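-- pv_equiv track=rewrite | github.com/mcmiller905/AdventOfCode2021 | DayCode/day8.py | containsAtLeast3NumComponents
-- ===== SOURCE A (Python) =====
-- def containsAtLeast3NumComponents(num, exampleNum):
--     numContained = 0
--     for exampleLetter in exampleNum:
--         letterFlag = False
--         for numLetter in num:
--             if(numLetter == exampleLetter):
--                 letterFlag = True
--                 numContained = numContained + 1
--         if(not letterFlag):
--             overallFlag = False
--     return (numContained >= 3)
-- ===== SOURCE B (Python) =====
-- def containsAtLeast3NumComponents(num, exampleNum):
--     ce = {}
--     for c in exampleNum:
--         ce[c] = ce.get(c, 0) + 1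
--     cn = {}
--     for c in num:
--         cn[c] = cn.get(c, 0) + 1
--     total = 0
--     for c, k in ce.items():
--         total += k * cn.get(c, 0)
--     return total >= 3
-- ===== Notes on version B (the rewrite author's own statement) =====
-- stated objective: alternative
-- what changed: Replaces the nested per-character double loop (scanning num once for every letter of exampleNum) by building two frequency tables once and summing count-products over the distinct letters of exampleNum.
import Mathlib
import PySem

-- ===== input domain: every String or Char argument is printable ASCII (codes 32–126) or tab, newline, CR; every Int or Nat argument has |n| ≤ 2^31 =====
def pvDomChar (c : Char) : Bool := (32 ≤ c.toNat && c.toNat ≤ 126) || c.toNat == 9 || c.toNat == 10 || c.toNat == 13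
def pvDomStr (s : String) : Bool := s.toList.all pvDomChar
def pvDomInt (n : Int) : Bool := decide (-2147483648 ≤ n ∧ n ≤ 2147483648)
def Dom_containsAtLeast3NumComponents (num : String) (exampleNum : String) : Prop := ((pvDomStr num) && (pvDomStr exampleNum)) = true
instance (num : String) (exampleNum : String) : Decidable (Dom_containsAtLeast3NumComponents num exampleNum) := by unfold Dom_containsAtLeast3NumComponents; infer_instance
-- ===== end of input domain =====

-- B replaces A's nested per-character double loop by two frequency tables and one
-- pass over the distinct letters of exampleNum multiplying counts (alternative algorithm, same result).
-- ===== PORT A =====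
-- literal port of A: outer loop over exampleNum, inner loop over num with (letterFlag, numContained)
def containsAtLeast3NumComponents (num : String) (exampleNum : String) : Bool :=
  let numContained : Int :=
    exampleNum.toList.foldl (fun acc e =>
      let inner : Bool × Int :=
        num.toList.foldl (fun st c =>
          if c == e then (true, st.2 + 1) else st) (false, acc)
      -- letterFlag (inner.1) and overallFlag are dead in A: nothing reads them
      inner.2) 0
  decide (numContained ≥ 3)

-- ===== PORT B =====
def containsAtLeast3NumComponents_alt (num : String) (exampleNum : String) : Bool :=
  let ce : PySem.Dict Char Int :=
    exampleNum.toList.foldl (fun d c => d.insert c (d.getD c 0 + 1)) PySem.Dict.empty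
  let cn : PySem.Dict Char Int :=
    num.toList.foldl (fun d c => d.insert c (d.getD c 0 + 1)) PySem.Dict.empty
  let total : Int :=
    ce.items.foldl (fun acc p => acc + p.2 * cn.getD p.1 0) 0
  decide (total ≥ 3)

-- ===== PRECONDITION & SPEC =====
def Spec_containsAtLeast3NumComponents (num : String) (exampleNum : String) (out : Bool) : Prop := out = containsAtLeast3NumComponents_alt num exampleNum
instance (num : String) (exampleNum : String) (out : Bool) : Decidable (Spec_containsAtLeast3NumComponents num exampleNum out) := by unfold Spec_containsAtLeast3NumComponents; infer_instance

-- ===== CLAIM (what is proved, stated in full; the proofs are below) =====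
def Claim_equal_containsAtLeast3NumComponents : Prop := ∀ (num : String) (exampleNum : String), Dom_containsAtLeast3NumComponents num exampleNum → Spec_containsAtLeast3NumComponents num exampleNum (containsAtLeast3NumComponents num exampleNum)

-- ===== LEMMAS AND PROOFS =====

-- ===== VERDICT (by name: the statement is the Claim_ definition above) =====
-- inner loop of A adds num.count e to the accumulator
lemma innerA (e : Char) (l : List Char) : ∀ (fl : Bool) (acc : Int),
    (l.foldl (fun st c => if c == e then (true, st.2 + 1) else st) (fl, acc)).2
      = acc + (l.count e : Int) := by
  induction l with
  | nil => intro fl acc; simp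
  | cons x xs ih =>
    intro fl acc
    rw [List.foldl_cons]
    by_cases h : x == e
    · rw [if_pos h, ih]
      have he : x = e := beq_iff_eq.mp h
      have hc : (x :: xs).count e = xs.count e + 1 := by
        simp [List.count_cons, he]
      rw [hc]; push_cast; ring
    · rw [if_neg h, ih]
      have he : x ≠ e := fun hh => h (beq_iff_eq.mpr hh)
      have hc : (x :: xs).count e = xs.count e := by
        simp [List.count_cons, beq_iff_eq, he]
      rw [hc]

-- the whole A loop computes the sum of counts over exampleNum
lemma outerA (num : List Char) (ex : List Char) : ∀ (acc : Int),
    ex.foldl (fun acc e =>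
      (num.foldl (fun st c => if c == e then (true, st.2 + 1) else st) ((false : Bool), acc)).2) acc
      = acc + (ex.map (fun e => (num.count e : Int))).sum := by
  induction ex with
  | nil => intro acc; simp
  | cons x xs ih =>
    intro acc
    rw [List.foldl_cons, ih, innerA]
    simp only [List.map_cons, List.sum_cons]
    ring

-- sum over all letters = sum over distinct letters of count products
lemma sum_counts_eq (num ex : List Char) :
    (ex.map (fun e => (num.count e : Int))).sum
      = ((PySem.Set.ofList ex).map (fun c => (ex.count c : Int) * (num.count c : Int))).sum := by
  rw [Finset.sum_list_map_count]
  have hperm : (PySem.Set.ofList ex : List Char).Perm ex.dedup := by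
    rw [← PySem.List.dedup_eq_ofList]
    exact (List.perm_ext_iff_of_nodup (PySem.List.nodup_dedup ex) ex.nodup_dedup).mpr
      (fun a => by simp [PySem.List.mem_dedup])
  have htf : ex.toFinset = ex.dedup.toFinset := by
    ext a; simp
  have h1 : (∑ m ∈ ex.toFinset, List.count m ex • ((List.count m num : Int)))
      = ∑ c ∈ ex.toFinset, (List.count c ex : Int) * (List.count c num : Int) := by
    refine Finset.sum_congr rfl fun c hc => ?_
    simp [nsmul_eq_mul]
  rw [h1, htf, List.sum_toFinset _ ex.nodup_dedup, List.Perm.sum_eq (hperm.map _)]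

theorem containsAtLeast3NumComponents_spec : Claim_equal_containsAtLeast3NumComponents := by
  intro num ex _
  unfold Spec_containsAtLeast3NumComponents containsAtLeast3NumComponents containsAtLeast3NumComponents_alt
  simp only [PySem.Dict.foldl_insert_getD_add_one_eq_counter, PySem.Dict.items_counter,
    PySem.List.foldl_add, outerA, sum_counts_eq, PySem.Dict.getD_counter]
  simp [Function.comp_def]
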